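-- pv_equiv track=rewrite | github.com/Transport-for-the-North/caf.toolkit | src/caf/toolkit/toolbox.py | list_safe_remove
-- ===== SOURCE A (Python) =====
-- from typing import Any
--
-- def list_safe_remove(
--     lst: list[Any],
--     remove: list[Any],
--     raise_error: bool = False,
--     inplace: bool = False,
-- ) -> list[Any]:
--     """
--     Remove items from a list without raising an error.
--
--     Parameters
--     ----------
--     lst:
--         The list to remove items from
--
--     remove:
--         The items to remove from lst
--
--     raise_error:
--         Whether to raise an error or not when an item in `remove` is
--         not contained in lst
--
--     inplace:
--         Whether to remove the items in-place, or return a copy of lst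
--
--     Returns
--     -------
--     lst:
--         lst with removed items removed from it
--     """
--     # Init
--     if not inplace:
--         lst = lst.copy()
--
--     for item in remove:
--         try:
--             lst.remove(item)
--         except ValueError as exception:
--             if raise_error:
--                 raise exception
--
--     return lst
-- ===== SOURCE B (Python) =====
-- def list_safe_remove(
--     lst,
--     remove,
--     raise_error=False,
--     inplace=False,
-- ):
--     """Remove items from a list without raising an error (single pass)."""
--     # Count how many copies of each value must be removed.
--     need = {}
--     for item in remove:
--         need[item] = need.get(item, 0) + 1
--     if raise_error:
--         have = {}
--         for x in lst:
--             have[x] = have.get(x, 0) + 1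
--         for item, n in need.items():
--             if n > have.get(item, 0):
--                 raise ValueError("list.remove(x): x not in list")
--     # One pass over lst, skipping up to need[x] occurrences of each x.
--     kept = []
--     for x in lst:
--         if need.get(x, 0) > 0:
--             need[x] -= 1
--         else:
--             kept.append(x)
--     if inplace:
--         lst[:] = kept
--         return lst
--     return kept
-- ===== Notes on version B (the rewrite author's own statement) =====
-- stated objective: faster
-- what changed: Replace the per-item list.remove scans (one O(n) scan per removal item) with a counting dict built once and a single pass over lst that skips up to count occurrences of each value.
import Mathlib
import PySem

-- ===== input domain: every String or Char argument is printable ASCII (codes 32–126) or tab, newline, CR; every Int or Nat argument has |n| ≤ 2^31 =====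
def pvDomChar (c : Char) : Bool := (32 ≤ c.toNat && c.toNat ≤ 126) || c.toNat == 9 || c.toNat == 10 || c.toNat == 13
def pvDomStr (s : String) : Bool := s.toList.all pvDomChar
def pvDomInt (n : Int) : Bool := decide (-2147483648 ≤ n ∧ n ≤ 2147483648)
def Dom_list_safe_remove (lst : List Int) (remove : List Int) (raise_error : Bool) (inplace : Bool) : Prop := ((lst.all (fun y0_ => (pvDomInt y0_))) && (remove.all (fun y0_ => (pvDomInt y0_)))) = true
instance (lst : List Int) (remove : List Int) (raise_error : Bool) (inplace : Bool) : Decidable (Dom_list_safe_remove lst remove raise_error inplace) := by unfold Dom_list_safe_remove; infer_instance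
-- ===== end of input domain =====

-- B replaces A's per-item list.remove scans by a counting dict and one skip pass (faster, asymptotic).
-- Equivalence is about the RETURN value only: with inplace=True both Pythons mutate lst to that same value.

-- ===== PORT A =====
-- for item in remove: try lst.remove(item) except ValueError: if raise_error: raise
def list_safe_remove (lst : List Int) (remove : List Int) (raise_error : Bool) (inplace : Bool) : List Int :=
  remove.foldl (fun acc item =>
    match PySem.List.remove? acc item with
    | some l => l
    | none => acc   -- Python raises here iff raise_error = true; those inputs are excluded by Pre_
  ) lst

-- ===== PORT B =====
def list_safe_remove_alt (lst : List Int) (remove : List Int) (raise_error : Bool) (inplace : Bool) : List Int :=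
  -- need = counting dict of `remove` (Source B's explicit dict loop)
  let need : PySem.Dict Int Int :=
    remove.foldl (fun d item => d.insert item (d.getD item 0 + 1)) PySem.Dict.empty
  -- (Source B's raise_error check only raises, on inputs excluded by Pre_; it never changes the value)
  -- single pass: skip x while need[x] > 0, else keep it
  (lst.foldl (fun (st : PySem.Dict Int Int × List Int) x =>
      if st.1.getD x 0 > 0 then (st.1.insert x (st.1.getD x 0 - 1), st.2)
      else (st.1, st.2 ++ [x])) (need, ([] : List Int))).2

-- ===== PRECONDITION & SPEC =====
-- Pre_ excludes exactly the inputs where Python A raises ValueError: raise_error=True and some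
-- item of `remove` occurs in `remove` more often than in `lst` (so a list.remove call fails).
def Pre_list_safe_remove (lst : List Int) (remove : List Int) (raise_error : Bool) (inplace : Bool) : Prop :=
  raise_error = true → ∀ x ∈ remove, remove.count x ≤ lst.count x
instance (lst : List Int) (remove : List Int) (raise_error : Bool) (inplace : Bool) : Decidable (Pre_list_safe_remove lst remove raise_error inplace) := by unfold Pre_list_safe_remove; infer_instance
def pvWitness_list_safe_remove : List Int × List Int × Bool × Bool := ([1, 2, 2, 3], [2, 3], true, false)

def Spec_list_safe_remove (lst : List Int) (remove : List Int) (raise_error : Bool) (inplace : Bool) (out : List Int) : Prop := out = list_safe_remove_alt lst remove raise_error inplace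
instance (lst : List Int) (remove : List Int) (raise_error : Bool) (inplace : Bool) (out : List Int) : Decidable (Spec_list_safe_remove lst remove raise_error inplace out) := by unfold Spec_list_safe_remove; infer_instance

-- ===== CLAIM (what is proved, stated in full; the proofs are below) =====
def Claim_equal_list_safe_remove : Prop := ∀ (lst : List Int) (remove : List Int) (raise_error : Bool) (inplace : Bool), Dom_list_safe_remove lst remove raise_error inplace → Pre_list_safe_remove lst remove raise_error inplace → Spec_list_safe_remove lst remove raise_error inplace (list_safe_remove lst remove raise_error inplace)

-- ===== LEMMAS AND PROOFS =====

-- structural "remove first occurrence, or keep the list"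
def rm1 (v : Int) : List Int → List Int
  | [] => []
  | x :: xs => if x = v then xs else x :: rm1 v xs

-- the common mathematical core: one pass skipping up to c x occurrences of each x
def skipPass (c : Int → Int) : List Int → List Int
  | [] => []
  | x :: xs => if 0 < c x then skipPass (fun y => if y = x then c y - 1 else c y) xs
               else x :: skipPass c xs

theorem match_remove?_eq_rm1 (v : Int) (l : List Int) :
    (match PySem.List.remove? l v with | some l' => l' | none => l) = rm1 v l := by
  induction l with
  | nil => simp [PySem.List.remove?, rm1]
  | cons x xs ih =>
    by_cases h : x = v
    · subst h; simp [PySem.List.remove?_cons_self, rm1]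
    · rw [PySem.List.remove?_cons_of_ne xs h]
      cases hr : PySem.List.remove? xs v with
      | none => simpa [rm1, h, hr] using ih
      | some l' => simpa [rm1, h, hr] using ih

theorem skipPass_nonpos (c : Int → Int) (l : List Int) (h : ∀ y, c y ≤ 0) :
    skipPass c l = l := by
  induction l with
  | nil => rfl
  | cons x xs ih => simp [skipPass, not_lt.mpr (h x), ih]

theorem skipPass_bump (r : Int) (c : Int → Int) (h : ∀ y, 0 ≤ c y) (l : List Int) :
    skipPass (fun y => if y = r then c y + 1 else c y) l = skipPass c (rm1 r l) := by
  induction l generalizing c with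
  | nil => rfl
  | cons x xs ih =>
    by_cases hx : x = r
    · subst hx
      have hpos : (0 : Int) < c x + 1 := by have := h x; omega
      have hdec : (fun y => if y = x then (if y = x then c y + 1 else c y) - 1
                            else (if y = x then c y + 1 else c y)) = c := by
        funext y; by_cases hy : y = x <;> simp [hy]
      simp [skipPass, rm1, hdec, hpos]
    · have hne : (if x = r then c x + 1 else c x) = c x := by simp [hx]
      by_cases hc : 0 < c x
      · have hcomm : (fun y => if y = x then (if y = r then c y + 1 else c y) - 1
                              else (if y = r then c y + 1 else c y))
            = (fun y => if y = r then (if y = x then c y - 1 else c y) + 1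
                        else (if y = x then c y - 1 else c y)) := by
          funext y
          by_cases hy : y = x
          · subst hy; simp [hx]
          · by_cases hyr : y = r <;> simp [hy, hyr, Ne.symm hx]
        have hnn : ∀ y, 0 ≤ (fun y => if y = x then c y - 1 else c y) y := by
          intro y; by_cases hy : y = x <;> simp [hy] <;> [omega; exact h y]
        simp only [skipPass, rm1, hne, if_pos hc, if_neg hx, hcomm, ih _ hnn]
      · simp only [skipPass, rm1, hne, if_neg hc, if_neg hx, ih c h]

theorem portA_eq_skipPass (remove lst : List Int) :
    list_safe_remove lst remove false false
      = skipPass (fun y => (remove.count y : Int)) lst := by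
  show remove.foldl _ lst = _
  induction remove generalizing lst with
  | nil =>
    simp [List.foldl]
    rw [skipPass_nonpos] <;> simp
  | cons r rs ih =>
    have hcnt : (fun y => (((r :: rs).count y : Nat) : Int))
        = fun y => if y = r then ((rs.count y : Nat) : Int) + 1 else ((rs.count y : Nat) : Int) := by
      funext y; by_cases hy : y = r
      · simp [hy]
      · simp [hy, Ne.symm hy]
    rw [hcnt, skipPass_bump r _ (fun y => by positivity)]
    simp only [List.foldl_cons, match_remove?_eq_rm1 r lst]
    exact ih (rm1 r lst)

theorem portA_flags (lst remove : List Int) (re ip : Bool) :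
    list_safe_remove lst remove re ip = list_safe_remove lst remove false false := rfl

theorem portB_pass (lst : List Int) (d : PySem.Dict Int Int) (acc : List Int) (c : Int → Int)
    (hd : ∀ y, d.getD y 0 = c y) :
    (lst.foldl (fun (st : PySem.Dict Int Int × List Int) x =>
        if st.1.getD x 0 > 0 then (st.1.insert x (st.1.getD x 0 - 1), st.2)
        else (st.1, st.2 ++ [x])) (d, acc)).2 = acc ++ skipPass c lst := by
  induction lst generalizing d acc c with
  | nil => simp [skipPass]
  | cons x xs ih =>
    by_cases hc : 0 < c x
    · have h1 : d.getD x 0 > 0 := by rw [hd]; exact hc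
      simp only [List.foldl_cons, if_pos h1, skipPass, if_pos hc]
      exact ih _ _ _ (fun y => by
        rw [PySem.Dict.getD_insert]
        by_cases hy : y = x <;> simp [hy, hd])
    · have h1 : ¬ d.getD x 0 > 0 := by rw [hd]; exact hc
      simp only [List.foldl_cons, if_neg h1, skipPass, if_neg hc]
      rw [ih _ _ _ hd, List.append_assoc]; rfl

theorem portB_eq_skipPass (lst remove : List Int) (re ip : Bool) :
    list_safe_remove_alt lst remove re ip
      = skipPass (fun y => (remove.count y : Int)) lst := by
  show (lst.foldl _ (_, ([] : List Int))).2 = _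
  rw [portB_pass lst _ [] (fun y => (remove.count y : Int))
      (fun y => by
        rw [PySem.Dict.foldl_insert_getD_add_one_eq_counter, PySem.Dict.getD_counter])]
  simp

-- ===== VERDICT (by name: the statement is the Claim_ definition above) =====
theorem list_safe_remove_spec : Claim_equal_list_safe_remove := by
  intro lst remove re ip _ _
  show list_safe_remove lst remove re ip = list_safe_remove_alt lst remove re ip
  rw [portA_flags, portA_eq_skipPass, portB_eq_skipPass]
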